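-- pv_equiv track=rewrite | github.com/jerzy-kraszewski/sprague-grundy-periodicity-analysis | subtraction-game.py | detect_pure_period
-- ===== SOURCE A (Python) =====
-- def detect_pure_period(grundy, max_p=None):
--     """
--     Detect the smallest (l, p) such that for all n >= l:
--        grundy[n + p] == grundy[n].
--
--     Parameters:
--     -----------
--     grundy : list of integers (the Sprague-Grundy sequence)
--     max_p  : int or None
--         Maximum period to check. If None, periods up to length of `grundy` - 1 will be checked.
--
--     Returns:
--     --------
--     (l, p) if a period is found,
--     or (None, None) if no period is found within naive search bounds.
--     """
--     n = len(grundy)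
--     if max_p is None:
--         max_p = n - 1
--
--     for l in range(n):
--         for p in range(1, min(max_p + 1, n - l)):
--             is_periodic = True
--
--             for i in range(l, n - p):
--                 if grundy[i] != grundy[i + p]:
--                     is_periodic = False
--                     break
--             if is_periodic:
--                 return (l, p)
--
--     return (None, None)
-- ===== SOURCE B (Python) =====
-- def detect_pure_period(grundy, max_p=None):
--     n = len(grundy)
--     lim = n - 1 if max_p is None else min(max_p, n - 1)
--     best = None  # lexicographically smallest candidate (l, p)
--     for p in range(1, lim + 1):
--         # m = index after the last mismatch at distance p (backward scan, stop at first hit)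
--         m = 0
--         for i in range(n - p - 1, -1, -1):
--             if grundy[i] != grundy[i + p]:
--                 m = i + 1
--                 break
--         if m < n - p and (best is None or (m, p) < best):
--             best = (m, p)
--     return best if best is not None else (None, None)
-- ===== Notes on version B (the rewrite author's own statement) =====
-- stated objective: faster
-- what changed: B drops A's outer loop over start indices entirely: one backward early-exit scan per period p computes m(p), the index after the last mismatch at distance p, and the answer is the lexicographic minimum of the candidate pairs (m(p), p), found in a single pass over p.
import Mathlib
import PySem

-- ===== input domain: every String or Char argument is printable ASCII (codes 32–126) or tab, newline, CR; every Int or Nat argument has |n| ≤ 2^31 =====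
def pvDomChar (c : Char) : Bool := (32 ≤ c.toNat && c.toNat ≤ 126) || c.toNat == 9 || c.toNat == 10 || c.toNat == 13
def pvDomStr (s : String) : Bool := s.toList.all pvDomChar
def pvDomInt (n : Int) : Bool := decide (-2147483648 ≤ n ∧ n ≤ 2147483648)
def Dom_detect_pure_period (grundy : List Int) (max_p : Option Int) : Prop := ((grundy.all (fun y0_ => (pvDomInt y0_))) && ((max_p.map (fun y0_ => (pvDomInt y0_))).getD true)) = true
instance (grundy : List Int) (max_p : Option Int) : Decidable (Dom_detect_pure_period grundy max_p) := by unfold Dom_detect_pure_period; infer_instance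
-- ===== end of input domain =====

-- B replaces A's triple loop (start l, period p, rescan) by a single pass over periods p:
-- one backward early-exit scan per p yields m(p) = index after the last mismatch at distance
-- p, and the answer is the lexicographically smallest candidate pair (m(p), p). Same value.

-- ===== PORT A =====
-- inner loop: for i in range(l, n - p): if grundy[i] != grundy[i+p]: break
def ppAInner (grundy : List Int) (p : Int) : List Int → Bool
  | [] => true
  | i :: rest =>
    if PySem.List.pyGetD grundy i 0 ≠ PySem.List.pyGetD grundy (i + p) 0 then false
    else ppAInner grundy p rest

-- middle loop: for p in range(1, min(max_p + 1, n - l)) with early return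
def ppAPLoop (grundy : List Int) (n l : Int) : List Int → Option Int
  | [] => none
  | p :: rest =>
    if ppAInner grundy p (PySem.List.pyRange l (n - p) 1) then some p
    else ppAPLoop grundy n l rest

-- outer loop: for l in range(n) with early return
def ppALLoop (grundy : List Int) (n mp : Int) : List Int → Option Int × Option Int
  | [] => (none, none)
  | l :: rest =>
    match ppAPLoop grundy n l (PySem.List.pyRange 1 (min (mp + 1) (n - l)) 1) with
    | some p => (some l, some p)
    | none => ppALLoop grundy n mp rest

def detect_pure_period (grundy : List Int) (max_p : Option Int) : Option Int × Option Int :=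
  let n : Int := (grundy.length : Int)
  let mp : Int := max_p.getD (n - 1)
  ppALLoop grundy n mp (PySem.List.pyRange 0 n 1)

-- ===== PORT B =====
-- backward scan: for i in range(n - p - 1, -1, -1): if grundy[i] != grundy[i+p]: m = i+1; break
def ppMisB (grundy : List Int) (p : Int) : List Int → Int
  | [] => 0
  | i :: rest =>
    if PySem.List.pyGetD grundy i 0 ≠ PySem.List.pyGetD grundy (i + p) 0 then i + 1
    else ppMisB grundy p rest

def ppMis (grundy : List Int) (p : Int) : Int :=
  ppMisB grundy p (PySem.List.pyRange ((grundy.length : Int) - p - 1) (-1) (-1))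

-- tuple comparison (m, p) < best  (best is None → True)
def ppBetter (x : Int × Int) (b : Option (Int × Int)) : Bool :=
  match b with
  | none => true
  | some y => decide (x.1 < y.1 ∨ (x.1 = y.1 ∧ x.2 < y.2))

-- single pass over p, keeping the lexicographically smallest candidate (m(p), p)
def ppBestLoop (grundy : List Int) (n : Int) (best : Option (Int × Int)) : List Int → Option (Int × Int)
  | [] => best
  | p :: rest =>
    let m := ppMis grundy p
    ppBestLoop grundy n
      (if m < n - p ∧ ppBetter (m, p) best = true then some (m, p) else best) rest

def detect_pure_period_alt (grundy : List Int) (max_p : Option Int) : Option Int × Option Int :=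
  let n : Int := (grundy.length : Int)
  let lim : Int := match max_p with | none => n - 1 | some m => min m (n - 1)
  match ppBestLoop grundy n none (PySem.List.pyRange 1 (lim + 1) 1) with
  | some (l, p) => (some l, some p)
  | none => (none, none)

-- ===== PRECONDITION & SPEC =====
def Spec_detect_pure_period (grundy : List Int) (max_p : Option Int) (out : Option Int × Option Int) : Prop := out = detect_pure_period_alt grundy max_p
instance (grundy : List Int) (max_p : Option Int) (out : Option Int × Option Int) : Decidable (Spec_detect_pure_period grundy max_p out) := by unfold Spec_detect_pure_period; infer_instance

-- ===== CLAIM (what is proved, stated in full; the proofs are below) =====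
def Claim_equal_detect_pure_period : Prop := ∀ (grundy : List Int) (max_p : Option Int), Dom_detect_pure_period grundy max_p → Spec_detect_pure_period grundy max_p (detect_pure_period grundy max_p)

-- ===== LEMMAS AND PROOFS =====

-- x is in the candidate set described by an accumulator b0 and a remaining period list ps
def ppInS (grundy : List Int) (n : Int) (b0 : Option (Int × Int)) (ps : List Int) (x : Int × Int) : Prop :=
  b0 = some x ∨ ∃ p ∈ ps, ppMis grundy p < n - p ∧ x = (ppMis grundy p, p)

def ppLexLt (y x : Int × Int) : Prop := y.1 < x.1 ∨ (y.1 = x.1 ∧ y.2 < x.2)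

-- A's inner loop accepts [l, b) iff every index there matches at distance p.
theorem ppAInner_true_iff (grundy : List Int) (p l b : Int) :
    ppAInner grundy p (PySem.List.pyRange l b 1) = true ↔
      ∀ i : Int, l ≤ i → i < b →
        PySem.List.pyGetD grundy i 0 = PySem.List.pyGetD grundy (i + p) 0 := by
  generalize hk : (b - l).toNat = k
  induction k generalizing l with
  | zero =>
    rw [PySem.List.pyRange_one_eq_nil (by omega)]
    simp only [ppAInner, true_iff]
    intro i h1 h2
    exact absurd h2 (by omega)
  | succ k ih =>
    rw [PySem.List.pyRange_one_cons (by omega : l < b)]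
    simp only [ppAInner]
    split_ifs with hm
    · simp only [false_iff]
      intro h
      exact hm (h l le_rfl (by omega))
    · rw [ih (l + 1) (by omega)]
      constructor
      · intro h i h1 h2
        rcases h1.lt_or_eq with h1' | h1'
        · exact h i (by omega) h2
        · exact h1' ▸ not_ne_iff.mp hm
      · intro h i h1 h2
        exact h i (by omega) h2

-- B's backward scan: the result is ≤ l iff every index from l up to the scan start matches
-- at distance p (for 0 ≤ l).
theorem ppMisB_le_iff (grundy : List Int) (p a l : Int) (hl : 0 ≤ l) :
    ppMisB grundy p (PySem.List.pyRange a (-1) (-1)) ≤ l ↔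
      ∀ i : Int, l ≤ i → i ≤ a →
        PySem.List.pyGetD grundy i 0 = PySem.List.pyGetD grundy (i + p) 0 := by
  generalize hk : (a + 1).toNat = k
  induction k generalizing a with
  | zero =>
    rw [PySem.List.pyRange_neg_one_eq_nil (by omega : a ≤ -1)]
    simp only [ppMisB]
    constructor
    · intro _ i h1 h2
      exact absurd h2 (by omega)
    · intro _
      exact hl
  | succ k ih =>
    rw [PySem.List.pyRange_neg_one_cons (by omega : (-1 : Int) < a)]
    simp only [ppMisB]
    split_ifs with hm
    · constructor
      · intro h i h1 h2
        exact absurd h2 (by omega)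
      · intro h
        by_contra hlt
        exact hm (h a (by omega) le_rfl)
    · rw [ih (a - 1) (by omega)]
      constructor
      · intro h i h1 h2
        rcases h2.lt_or_eq with h2' | h2'
        · exact h i h1 (by omega)
        · exact h2' ▸ not_ne_iff.mp hm
      · intro h i h1 h2
        exact h i h1 (by omega)

theorem ppMisB_nonneg (grundy : List Int) (p : Int) : ∀ xs : List Int,
    (∀ i ∈ xs, 0 ≤ i) → 0 ≤ ppMisB grundy p xs := by
  intro xs
  induction xs with
  | nil =>
    intro _
    exact le_rfl
  | cons i rest ih =>
    intro h
    simp only [ppMisB]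
    split_ifs with hm
    · have := h i (List.mem_cons_self ..)
      omega
    · exact ih (fun j hj => h j (List.mem_cons_of_mem _ hj))

theorem ppMis_nonneg (grundy : List Int) (p : Int) : 0 ≤ ppMis grundy p := by
  apply ppMisB_nonneg
  intro i hi
  rw [PySem.List.mem_pyRange_neg_one] at hi
  omega

-- bridge: A's inner acceptance at start l equals "m(p) ≤ l" (for 0 ≤ l)
theorem inner_iff_mis_le (grundy : List Int) (p l : Int) (hl : 0 ≤ l) :
    ppAInner grundy p (PySem.List.pyRange l ((grundy.length : Int) - p) 1) = true ↔
      ppMis grundy p ≤ l := by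
  rw [ppAInner_true_iff, ppMis, ppMisB_le_iff grundy p _ l hl]
  constructor
  · intro h i h1 h2
    exact h i h1 (by omega)
  · intro h i h1 h2
    exact h i h1 (by omega)

-- the lexicographic order on Int pairs is total
theorem ppLexLt_total (z y : Int × Int) : z = y ∨ ppLexLt z y ∨ ppLexLt y z := by
  obtain ⟨z1, z2⟩ := z
  obtain ⟨y1, y2⟩ := y
  unfold ppLexLt
  simp only [Prod.mk.injEq]
  omega

theorem ppLexLt_trans (a b c : Int × Int) (h1 : ppLexLt a b) (h2 : ppLexLt b c) : ppLexLt a c := by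
  unfold ppLexLt at h1 h2 ⊢
  omega

-- B's loop computes the lexicographic minimum of the candidate set
theorem bestLoop_spec (grundy : List Int) (n : Int) (ps : List Int) :
    ∀ b0 : Option (Int × Int),
      (ppBestLoop grundy n b0 ps = none → ∀ x, ¬ ppInS grundy n b0 ps x) ∧
      (∀ x, ppBestLoop grundy n b0 ps = some x →
        ppInS grundy n b0 ps x ∧ ∀ y, ppInS grundy n b0 ps y → ¬ ppLexLt y x) := by
  induction ps with
  | nil =>
    intro b0
    constructor
    · intro hn x hx
      rcases hx with hx | ⟨p, hp, _⟩
      · rw [show ppBestLoop grundy n b0 [] = b0 from rfl] at hn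
        rw [hn] at hx
        simp at hx
      · simp at hp
    · intro x hx
      rw [show ppBestLoop grundy n b0 [] = b0 from rfl] at hx
      refine ⟨Or.inl hx, fun y hy => ?_⟩
      rcases hy with hy | ⟨p, hp, _⟩
      · rw [hx] at hy
        obtain rfl : y = x := by injection hy with h; exact h.symm
        unfold ppLexLt
        omega
      · simp at hp
  | cons p rest ih =>
    intro b0
    have hstep : ppBestLoop grundy n b0 (p :: rest) =
        ppBestLoop grundy n
          (if ppMis grundy p < n - p ∧ ppBetter (ppMis grundy p, p) b0 = true
            then some (ppMis grundy p, p) else b0) rest := rfl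
    set b1 := if ppMis grundy p < n - p ∧ ppBetter (ppMis grundy p, p) b0 = true
      then some (ppMis grundy p, p) else b0 with hb1
    -- membership transfer: the b1/rest set is contained in the b0/(p::rest) set
    have hsub : ∀ x, ppInS grundy n b1 rest x → ppInS grundy n b0 (p :: rest) x := by
      intro x hx
      rcases hx with hx | ⟨q, hq, hcq, hxq⟩
      · rw [hb1] at hx
        split_ifs at hx with hc
        · obtain rfl : x = (ppMis grundy p, p) := by injection hx with h; exact h.symm
          exact Or.inr ⟨p, List.mem_cons_self .., hc.1, rfl⟩
        · exact Or.inl hx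
      · exact Or.inr ⟨q, List.mem_cons_of_mem _ hq, hcq, hxq⟩
    -- every element of the b0/(p::rest) set is lex-dominated by an element of the b1/rest set
    have hdom : ∀ y, ppInS grundy n b0 (p :: rest) y →
        ∃ z, ppInS grundy n b1 rest z ∧ (z = y ∨ ppLexLt z y) := by
      intro y hy
      rcases hy with hy | ⟨q, hq, hcq, hyq⟩
      · -- y comes from b0
        by_cases hc : ppMis grundy p < n - p ∧ ppBetter (ppMis grundy p, p) b0 = true
        · refine ⟨(ppMis grundy p, p), Or.inl (by rw [hb1, if_pos hc]), Or.inr ?_⟩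
          have hb := hc.2
          rw [hy] at hb
          simp only [ppBetter, decide_eq_true_eq] at hb
          exact hb
        · exact ⟨y, Or.inl (by rw [hb1, if_neg hc]; exact hy), Or.inl rfl⟩
      · rcases List.mem_cons.mp hq with rfl | hq'
        · -- y is the candidate for p itself
          by_cases hc : ppMis grundy q < n - q ∧ ppBetter (ppMis grundy q, q) b0 = true
          · exact ⟨(ppMis grundy q, q), Or.inl (by rw [hb1, if_pos hc]), Or.inl hyq.symm⟩
          · have hbet : ppBetter (ppMis grundy q, q) b0 ≠ true := fun hb => hc ⟨hcq, hb⟩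
            cases hz : b0 with
            | none =>
              rw [hz] at hbet
              exact absurd rfl hbet
            | some z =>
              rw [hz] at hbet hc
              have hb1z : b1 = some z := by
                rw [hb1, hz, if_neg hc]
              have hnlt : ¬ ppLexLt (ppMis grundy q, q) z := by
                intro hl
                apply hbet
                simp only [ppBetter, decide_eq_true_eq]
                exact hl
              refine ⟨z, Or.inl hb1z, ?_⟩
              rcases ppLexLt_total z y with h | h | h
              · exact Or.inl h
              · exact Or.inr h
              · exact absurd (hyq ▸ h) hnlt
        · exact ⟨y, Or.inr ⟨q, hq', hcq, hyq⟩, Or.inl rfl⟩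
    obtain ⟨ihnone, ihsome⟩ := ih b1
    constructor
    · intro hn x hx
      rw [hstep] at hn
      obtain ⟨z, hz, _⟩ := hdom x hx
      exact ihnone hn z hz
    · intro x hx
      rw [hstep] at hx
      obtain ⟨hmem, hmin⟩ := ihsome x hx
      refine ⟨hsub x hmem, fun y hy hlt => ?_⟩
      obtain ⟨z, hz, hrel⟩ := hdom y hy
      have hnz := hmin z hz
      rcases hrel with rfl | hzy
      · exact hnz hlt
      · exact hnz (ppLexLt_trans z y x hzy hlt)

-- A-side traversal lemmas: the p-loop returns the first accepted p, the l-loop the first l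
theorem ploop_none (grundy : List Int) (n l : Int) (ps : List Int)
    (h : ∀ p ∈ ps, ppAInner grundy p (PySem.List.pyRange l (n - p) 1) = false) :
    ppAPLoop grundy n l ps = none := by
  induction ps with
  | nil => rfl
  | cons p rest ih =>
    simp only [ppAPLoop]
    rw [if_neg (by rw [h p (List.mem_cons_self ..)]; simp)]
    exact ih (fun q hq => h q (List.mem_cons_of_mem _ hq))

theorem ploop_some (grundy : List Int) (n l : Int) : ∀ (a b pstar : Int),
    a ≤ pstar → pstar < b →
    ppAInner grundy pstar (PySem.List.pyRange l (n - pstar) 1) = true →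
    (∀ p : Int, a ≤ p → p < pstar →
      ppAInner grundy p (PySem.List.pyRange l (n - p) 1) = false) →
    ppAPLoop grundy n l (PySem.List.pyRange a b 1) = some pstar := by
  intro a b pstar h1 h2 htrue hfalse
  generalize hk : (b - a).toNat = k
  induction k generalizing a with
  | zero => omega
  | succ k ih =>
    rw [PySem.List.pyRange_one_cons (by omega : a < b)]
    simp only [ppAPLoop]
    rcases h1.lt_or_eq with h | rfl
    · rw [if_neg (by rw [hfalse a le_rfl h]; simp)]
      exact ih (a + 1) (by omega) (fun p hp1 hp2 => hfalse p (by omega) hp2) (by omega)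
    · rw [if_pos htrue]

theorem lloop_none (grundy : List Int) (n mp : Int) (ls : List Int)
    (h : ∀ l ∈ ls, ppAPLoop grundy n l (PySem.List.pyRange 1 (min (mp + 1) (n - l)) 1) = none) :
    ppALLoop grundy n mp ls = (none, none) := by
  induction ls with
  | nil => rfl
  | cons l rest ih =>
    simp only [ppALLoop]
    rw [h l (List.mem_cons_self ..)]
    exact ih (fun l' hl' => h l' (List.mem_cons_of_mem _ hl'))

theorem lloop_some (grundy : List Int) (n mp : Int) : ∀ (a b lstar pstar : Int),
    a ≤ lstar → lstar < b →
    ppAPLoop grundy n lstar (PySem.List.pyRange 1 (min (mp + 1) (n - lstar)) 1) = some pstar →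
    (∀ l : Int, a ≤ l → l < lstar →
      ppAPLoop grundy n l (PySem.List.pyRange 1 (min (mp + 1) (n - l)) 1) = none) →
    ppALLoop grundy n mp (PySem.List.pyRange a b 1) = (some lstar, some pstar) := by
  intro a b lstar pstar h1 h2 hsome hnone
  generalize hk : (b - a).toNat = k
  induction k generalizing a with
  | zero => omega
  | succ k ih =>
    rw [PySem.List.pyRange_one_cons (by omega : a < b)]
    simp only [ppALLoop]
    rcases h1.lt_or_eq with h | rfl
    · rw [hnone a le_rfl h]
      exact ih (a + 1) (by omega) (fun l hl1 hl2 => hnone l (by omega) hl2) (by omega)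
    · rw [hsome]

-- a pair (l, p) accepted by A's loops yields a candidate in B's set
theorem valid_to_cand (grundy : List Int) (mp l p : Int)
    (hl0 : 0 ≤ l) (hp1 : 1 ≤ p) (hpmp : p ≤ mp) (hpl : p < (grundy.length : Int) - l)
    (htrue : ppAInner grundy p (PySem.List.pyRange l ((grundy.length : Int) - p) 1) = true) :
    ppMis grundy p ≤ l ∧ ppMis grundy p < (grundy.length : Int) - p ∧
      1 ≤ p ∧ p ≤ min mp ((grundy.length : Int) - 1) := by
  have hm := (inner_iff_mis_le grundy p l hl0).mp htrue
  exact ⟨hm, by omega, hp1, by omega⟩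

-- common core: A's nested search over starts equals B's single pass over periods
theorem search_eq (grundy : List Int) (mp : Int) :
    ppALLoop grundy (grundy.length : Int) mp (PySem.List.pyRange 0 (grundy.length : Int) 1) =
      (match ppBestLoop grundy (grundy.length : Int) none
          (PySem.List.pyRange 1 (min mp ((grundy.length : Int) - 1) + 1) 1) with
        | some (l, p) => (some l, some p)
        | none => (none, none)) := by
  set n : Int := (grundy.length : Int) with hn
  set lim : Int := min mp (n - 1) with hlim
  obtain ⟨hnone, hsome⟩ := bestLoop_spec grundy n (PySem.List.pyRange 1 (lim + 1) 1) none
  match hb : ppBestLoop grundy n none (PySem.List.pyRange 1 (lim + 1) 1) with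
  | none =>
    apply lloop_none
    intro l hl
    rw [PySem.List.mem_pyRange_one] at hl
    apply ploop_none
    intro p hp
    rw [PySem.List.mem_pyRange_one] at hp
    by_contra hne
    have htrue : ppAInner grundy p (PySem.List.pyRange l (n - p) 1) = true := by
      cases h : ppAInner grundy p (PySem.List.pyRange l (n - p) 1)
      · exact absurd h hne
      · rfl
    obtain ⟨_, hc, _, hplim⟩ := valid_to_cand grundy mp l p (by omega) (by omega) (by omega)
      (by omega) htrue
    exact hnone hb (ppMis grundy p, p)
      (Or.inr ⟨p, PySem.List.mem_pyRange_one.mpr ⟨by omega, by omega⟩, hc, rfl⟩)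
  | some x =>
    obtain ⟨hmem, hmin⟩ := hsome x hb
    rcases hmem with hx | ⟨p, hp, hcp, hxp⟩
    · simp at hx
    rw [PySem.List.mem_pyRange_one] at hp
    obtain rfl := hxp
    set lstar : Int := ppMis grundy p with hls
    have hls0 : 0 ≤ lstar := ppMis_nonneg grundy p
    have hlsn : lstar < n := by omega
    apply lloop_some grundy n mp 0 n lstar p hls0 hlsn
    · -- at l = lstar the p-loop returns p
      apply ploop_some grundy n lstar 1 (min (mp + 1) (n - lstar)) p (by omega) (by omega)
      · exact (inner_iff_mis_le grundy p lstar hls0).mpr le_rfl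
      · intro q hq1 hq2
        by_contra hne
        have htrue : ppAInner grundy q (PySem.List.pyRange lstar (n - q) 1) = true := by
          cases h : ppAInner grundy q (PySem.List.pyRange lstar (n - q) 1)
          · exact absurd h hne
          · rfl
        have hmq := (inner_iff_mis_le grundy q lstar hls0).mp htrue
        have hcq : ppMis grundy q < n - q := by omega
        have hlt : ppLexLt (ppMis grundy q, q) (lstar, p) := by
          unfold ppLexLt
          simp only
          omega
        exact hmin (ppMis grundy q, q)
          (Or.inr ⟨q, PySem.List.mem_pyRange_one.mpr ⟨by omega, by omega⟩, hcq, rfl⟩) hlt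
    · -- for l < lstar no p is accepted
      intro l hl1 hl2
      apply ploop_none
      intro q hq
      rw [PySem.List.mem_pyRange_one] at hq
      by_contra hne
      have htrue : ppAInner grundy q (PySem.List.pyRange l (n - q) 1) = true := by
        cases h : ppAInner grundy q (PySem.List.pyRange l (n - q) 1)
        · exact absurd h hne
        · rfl
      obtain ⟨hmq, hcq, _, hqlim⟩ := valid_to_cand grundy mp l q (by omega) (by omega) (by omega)
        (by omega) htrue
      have hlt : ppLexLt (ppMis grundy q, q) (lstar, p) := by
        unfold ppLexLt
        simp only
        omega
      exact hmin (ppMis grundy q, q)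
        (Or.inr ⟨q, PySem.List.mem_pyRange_one.mpr ⟨by omega, by omega⟩, hcq, rfl⟩) hlt

-- ===== VERDICT (by name: the statement is the Claim_ definition above) =====
theorem detect_pure_period_spec : Claim_equal_detect_pure_period := by
  intro grundy max_p _
  unfold Spec_detect_pure_period detect_pure_period detect_pure_period_alt
  simp only
  cases max_p with
  | none =>
    have h := search_eq grundy ((grundy.length : Int) - 1)
    rw [min_self] at h
    simpa using h
  | some m =>
    have h := search_eq grundy m
    simpa using h
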